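-- pv_equiv track=rewrite | github.com/kiminandayo19/Genetic-Algorithm | geneticAlgorithmTSP.py | regeneration
-- ===== SOURCE A (Python) =====
-- def calculateFitness(genetic, distMatrix):
--     fitness = 0
--     for i in range(len(genetic) - 1):
--         fitness += distMatrix[genetic[i]][genetic[i+1]]
--     fitness += distMatrix[genetic[-1]][genetic[0]]
--     return fitness
--
-- def regeneration(population, children, distMatrix):
--     n = 0
--     sortedChildren = [(calculateFitness(gen, distMatrix), gen) for gen in children]
--     sortedChildren.sort()
--     newSort = []
--     newPop = []
--     for item in sortedChildren:
--         newSort.append(item[1])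
--     for i in range(len(population) - len(children)):
--         newPop.append(population[i])
--     for sort in newSort:
--         newPop.append(sort)
--     # newPop = population[:(len(population) - len(children))] + newSort
--     witFit = [(calculateFitness(gen, distMatrix), gen) for gen in newPop]
--     return newPop, witFit
-- ===== SOURCE B (Python) =====
-- def calculateFitness(genetic, distMatrix):
--     fitness = 0
--     for i in range(len(genetic) - 1):
--         fitness += distMatrix[genetic[i]][genetic[i+1]]
--     fitness += distMatrix[genetic[-1]][genetic[0]]
--     return fitness
--
-- def regeneration(population, children, distMatrix):
--     # online insertion sort: keep childFit sorted while scanning the children once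
--     childFit = []
--     for gen in children:
--         pair = (calculateFitness(gen, distMatrix), gen)
--         i = 0
--         while i < len(childFit) and childFit[i] <= pair:
--             i += 1
--         childFit.insert(i, pair)
--     keep = population[:max(0, len(population) - len(children))]
--     # witFit is the primary object (kept tours' fitness pairs + already-sorted child pairs);
--     # the new population is just its projection
--     witFit = [(calculateFitness(gen, distMatrix), gen) for gen in keep] + childFit
--     return [gen for _, gen in witFit], witFit
-- ===== Notes on version B (the rewrite author's own statement) =====
-- stated objective: alternative
-- what changed: B sorts the children by an online insertion sort (each fitness pair inserted into an already-sorted list while scanning children once) instead of list.sort, and inverts A's dependency: it builds the fitness list witFit first (kept tours' pairs + the sorted child pairs, so no fitness is recomputed for the children) and obtains the new population by projecting witFit, where A builds newPop with three append loops and then recomputes fitness for every member.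
-- outside the precondition, e.g. on regeneration([], [[]], [[0]]): A raises IndexError, B raises IndexError
import Mathlib
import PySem

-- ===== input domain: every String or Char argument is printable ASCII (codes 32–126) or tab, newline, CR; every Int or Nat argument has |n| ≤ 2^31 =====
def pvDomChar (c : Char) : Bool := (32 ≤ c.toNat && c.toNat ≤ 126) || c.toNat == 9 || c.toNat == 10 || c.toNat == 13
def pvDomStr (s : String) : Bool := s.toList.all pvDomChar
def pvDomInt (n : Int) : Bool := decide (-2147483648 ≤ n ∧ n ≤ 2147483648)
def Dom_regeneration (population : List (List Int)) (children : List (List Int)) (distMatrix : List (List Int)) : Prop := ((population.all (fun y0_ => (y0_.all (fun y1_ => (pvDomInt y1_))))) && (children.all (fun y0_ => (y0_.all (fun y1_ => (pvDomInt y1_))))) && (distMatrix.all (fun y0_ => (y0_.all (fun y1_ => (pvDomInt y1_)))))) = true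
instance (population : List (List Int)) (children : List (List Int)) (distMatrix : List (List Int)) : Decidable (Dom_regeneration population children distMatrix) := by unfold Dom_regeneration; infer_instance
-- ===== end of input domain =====

-- B replaces A's library sort + three append loops + full fitness recomputation by an online
-- insertion sort over the children and builds witFit first, projecting newPop out of it (objective: alternative).


-- ===== PORT A =====
-- shared module helper calculateFitness; pyGetD totalizes the indexing, Pre_ keeps every access in range
def calcFit (gen : List Int) (distMatrix : List (List Int)) : Int :=
  let f := (PySem.List.pyRange 0 ((gen.length : Int) - 1) 1).foldl
    (fun acc i =>
      acc + PySem.List.pyGetD (PySem.List.pyGetD distMatrix (PySem.List.pyGetD gen i 0) [])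
              (PySem.List.pyGetD gen (i + 1) 0) 0) 0
  f + PySem.List.pyGetD (PySem.List.pyGetD distMatrix (PySem.List.pyGetD gen (-1) 0) [])
        (PySem.List.pyGetD gen 0 0) 0

def regeneration (population : List (List Int)) (children : List (List Int)) (distMatrix : List (List Int)) : List (List Int) × (List (Int × List Int)) :=
  let sortedChildren := PySem.List.sorted2 (children.map (fun gen => (calcFit gen distMatrix, gen))) (fun p => p.1) (fun p => p.2)
  let newSort := sortedChildren.foldl (fun acc item => acc ++ [item.2]) []
  let newPop := (PySem.List.pyRange 0 ((population.length : Int) - (children.length : Int)) 1).foldl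
    (fun acc i => acc ++ [PySem.List.pyGetD population i []]) []
  let newPop := newSort.foldl (fun acc s => acc ++ [s]) newPop
  let witFit := newPop.map (fun gen => (calcFit gen distMatrix, gen))
  (newPop, witFit)

-- ===== PORT B =====
-- B's while-scan + list.insert: walk past every element ≤ pair (Python tuple order: fitness first,
-- list-lexicographic tie-break; 'y.2 ≤ x.2' is written ¬(x.2 < y.2), exact since list < is total)
def insPair (x : Int × List Int) : List (Int × List Int) → List (Int × List Int)
  | [] => [x]
  | y :: ys => if y.1 < x.1 ∨ (y.1 = x.1 ∧ ¬ (x.2 < y.2)) then y :: insPair x ys else x :: y :: ys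

def regeneration_alt (population : List (List Int)) (children : List (List Int)) (distMatrix : List (List Int)) : List (List Int) × (List (Int × List Int)) :=
  let childFit := children.foldl (fun acc gen => insPair (calcFit gen distMatrix, gen) acc) []
  let keep := population.take (population.length - children.length)   -- Nat sub = max(0, …)
  let witFit := keep.map (fun gen => (calcFit gen distMatrix, gen)) ++ childFit
  (witFit.map (fun p => p.2), witFit)

-- ===== PRECONDITION & SPEC =====
-- helper: the access distMatrix[a][b] succeeds
def pvPairOK (distMatrix : List (List Int)) (a b : Int) : Bool :=
  match PySem.List.pyGet? distMatrix a with
  | some row => decide (-(row.length : Int) ≤ b ∧ b < (row.length : Int))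
  | none => false

-- helper: calculateFitness(gen, distMatrix) returns (gen nonempty, every cyclically adjacent access in range)
def pvGenOK (distMatrix : List (List Int)) (gen : List Int) : Bool :=
  !gen.isEmpty && (gen.zip (gen.rotate 1)).all (fun p => pvPairOK distMatrix p.1 p.2)

-- Pre_ = exactly the inputs where Python A returns (no IndexError): every child tour and every kept
-- population tour is nonempty with all its cyclic distance-matrix lookups in range
def Pre_regeneration (population : List (List Int)) (children : List (List Int)) (distMatrix : List (List Int)) : Prop :=
  (∀ g ∈ children, pvGenOK distMatrix g = true) ∧
  (∀ g ∈ population.take (population.length - children.length), pvGenOK distMatrix g = true)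
instance (population : List (List Int)) (children : List (List Int)) (distMatrix : List (List Int)) : Decidable (Pre_regeneration population children distMatrix) := by unfold Pre_regeneration; infer_instance

def pvWitness_regeneration : List (List Int) × List (List Int) × List (List Int) :=
  ([[0, 1], [1, 0]], [[1, 0]], [[0, 3], [2, 0]])

def Spec_regeneration (population : List (List Int)) (children : List (List Int)) (distMatrix : List (List Int)) (out : List (List Int) × (List (Int × List Int))) : Prop := out = regeneration_alt population children distMatrix
instance (population : List (List Int)) (children : List (List Int)) (distMatrix : List (List Int)) (out : List (List Int) × (List (Int × List Int))) : Decidable (Spec_regeneration population children distMatrix out) := by unfold Spec_regeneration; infer_instance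

-- ===== CLAIM (what is proved, stated in full; the proofs are below) =====
def Claim_equal_regeneration : Prop := ∀ (population : List (List Int)) (children : List (List Int)) (distMatrix : List (List Int)), Dom_regeneration population children distMatrix → Pre_regeneration population children distMatrix → Spec_regeneration population children distMatrix (regeneration population children distMatrix)

-- ===== LEMMAS AND PROOFS =====

-- B's linear-scan insertion is PySem's insertBy under the tuple-lexicographic 'before' test
theorem insPair_eq_insertBy (x : Int × List Int) (ys : List (Int × List Int)) :
    insPair x ys = PySem.List.insertBy
      (fun a b => decide (a.1 < b.1) || (!decide (b.1 < a.1) && decide (a.2 < b.2))) x ys := by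
  induction ys with
  | nil => rfl
  | cons y ys ih =>
    show insPair x (y :: ys) = (if (decide (x.1 < y.1) || (!decide (y.1 < x.1) && decide (x.2 < y.2))) = true
      then x :: y :: ys
      else y :: PySem.List.insertBy (fun a b => decide (a.1 < b.1) || (!decide (b.1 < a.1) && decide (a.2 < b.2))) x ys)
    rw [insPair, ← ih]
    rcases lt_trichotomy x.1 y.1 with h | h | h
    · have h1 : ¬ (y.1 < x.1 ∨ (y.1 = x.1 ∧ ¬ (x.2 < y.2))) := by
        rintro (h2 | ⟨h2, -⟩) <;> omega
      rw [if_neg h1]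
      simp [h]
    · by_cases h2 : x.2 < y.2 <;> simp [h, h2]
    · simp [h, not_lt_of_gt h]

-- B's fold of insPair over the children IS sorted2 of their fitness pairs
theorem insFold_eq_sorted2 (children : List (List Int)) (distMatrix : List (List Int)) :
    children.foldl (fun acc gen => insPair (calcFit gen distMatrix, gen) acc) []
    = PySem.List.sorted2 (children.map (fun gen => (calcFit gen distMatrix, gen))) (fun p => p.1) (fun p => p.2) := by
  unfold PySem.List.sorted2
  rw [List.foldl_map]
  simp only [if_neg (by decide : ¬ (false = true))]
  simp only [insPair_eq_insertBy]

-- A's index-copy loop over range(len(population) - len(children)) builds population.take k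
theorem take_loop (population : List (List Int)) (c : Nat) :
    (PySem.List.pyRange 0 ((population.length : Int) - (c : Int)) 1).map
      (fun i => PySem.List.pyGetD population i [])
    = population.take (population.length - c) := by
  rw [PySem.List.pyRange_one]
  simp only [zero_add, List.map_map]
  by_cases h : population.length ≤ c
  · have h0 : ((population.length : Int) - (c : Int) - 0).toNat = 0 := by omega
    have h1 : population.length - c = 0 := by omega
    simp [h1]
  · have h : c < population.length := by omega
    have h0 : ((population.length : Int) - (c : Int) - 0).toNat = population.length - c := by omega
    rw [h0]
    apply List.ext_getElem
    · simp
    · intro i hi1 hi2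
      have hlt : i < population.length - c := by simpa using hi1
      have hlen : i < population.length := by omega
      simp [Function.comp, PySem.List.pyGetD_natCast, List.getD, List.getElem?_eq_getElem hlen]

-- the sorted pairs are exactly (calcFit gen, gen), so re-mapping fitness over their tours is the identity
theorem remap_sorted (children : List (List Int)) (distMatrix : List (List Int)) :
    ((PySem.List.sorted2 (children.map (fun gen => (calcFit gen distMatrix, gen))) (fun p => p.1) (fun p => p.2)).map
        (fun p => (calcFit p.2 distMatrix, p.2)))
    = PySem.List.sorted2 (children.map (fun gen => (calcFit gen distMatrix, gen))) (fun p => p.1) (fun p => p.2) := by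
  have hperm := PySem.List.sorted2_perm (children.map (fun gen => (calcFit gen distMatrix, gen))) (fun p => p.1) (fun p => p.2) false
  conv_rhs => rw [← List.map_id (PySem.List.sorted2 (children.map (fun gen => (calcFit gen distMatrix, gen))) (fun p => p.1) (fun p => p.2))]
  apply List.map_congr_left
  intro p hp
  have hmem : p ∈ children.map (fun gen => (calcFit gen distMatrix, gen)) := hperm.mem_iff.mp hp
  obtain ⟨g, -, rfl⟩ := List.mem_map.mp hmem
  rfl

-- ===== VERDICT (by name: the statement is the Claim_ definition above) =====
theorem regeneration_spec : Claim_equal_regeneration := by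
  intro population children distMatrix _ _
  show _ = _
  unfold regeneration regeneration_alt
  rw [insFold_eq_sorted2]
  simp only [PySem.List.foldl_append_singleton_eq_map]
  simp [take_loop, Function.comp_def, remap_sorted]
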